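-- pv_equiv track=rewrite | github.com/Keetasin/Robomaster_Challenge | pro_robomaster/project_functions.py | check_way
-- ===== SOURCE A (Python) =====
-- def check_way(data, state):
--     for i in state.keys():
--         if i == "front":
--             if data == "front":
--                 state = {
--                     "front": {"front": True, "left": True, "right": True, "back": True}
--                 }
--             if data == "left":
--                 state = {
--                     "left": {"left": True, "back": True, "front": True, "right": True}
--                 }
--             if data == "right":
--                 state = {
--                     "right": {"right": True, "front": True, "back": True, "left": True}
--                 }
--
--             if data == "back":
--                 state = {
--                     "back": {"back": True, "right": True, "left": True, "front": True}
--                 }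
--
--         elif i == "left":
--             if data == "front":
--                 state = {
--                     "left": {"left": True, "back": True, "front": True, "right": True}
--                 }
--             elif data == "left":
--                 state = {
--                     "back": {"back": True, "right": True, "left": True, "front": True}
--                 }
--             elif data == "right":
--                 state = {
--                     "front": {"front": True, "left": True, "right": True, "back": True}
--                 }
--             elif data == "back":
--                 state = {
--                     "right": {"right": True, "front": True, "back": True, "left": True}
--                 }
--         elif i == "right":
--             if data == "front":
--                 state = {
--                     "right": {"right": True, "front": True, "back": True, "left": True}
--                 }
--             elif data == "left":
--                 state = {
--                     "front": {"front": True, "left": True, "right": True, "back": True}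
--                 }
--             elif data == "right":
--                 state = {
--                     "back": {"back": True, "right": True, "left": True, "front": True}
--                 }
--
--             elif data == "back":
--                 state = {
--                     "left": {"left": True, "back": True, "front": True, "right": True}
--                 }
--
--         elif i == "back":
--             if data == "front":
--                 state = {
--                     "back": {"back": True, "right": True, "left": True, "front": True}
--                 }
--             elif data == "left":
--                 state = {
--                     "right": {"right": True, "front": True, "back": True, "left": True}
--                 }
--             elif data == "right":
--                 state = {
--                     "left": {"left": True, "back": True, "front": True, "right": True}
--                 }
--
--             elif data == "back":
--                 state = {
--                     "front": {"front": True, "left": True, "right": True, "back": True}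
--                 }
--     return state
-- ===== SOURCE B (Python) =====
-- ORDER = ["front", "left", "back", "right"]
--
--
-- def check_way(data, state):
--     # The 16 hand-written cases are rotation composition in the cyclic order
--     # front -> left -> back -> right; the inner dict's key order is the
--     # rotation offsets (0, 1, 3, 2) from the resulting direction.
--     if data in ORDER:
--         j = ORDER.index(data)
--         for i in state:
--             if i in ORDER:
--                 k = (ORDER.index(i) + j) % 4
--                 state = {ORDER[k]: {ORDER[(k + o) % 4]: True for o in (0, 1, 3, 2)}}
--     return state
-- ===== Notes on version B (the rewrite author's own statement) =====
-- stated objective: idiomatic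
-- what changed: Replaces A's 16 hand-written if/elif transition cases by rotation composition: new direction = ORDER[(ORDER.index(i)+ORDER.index(data))%4] in the cyclic order front,left,back,right, with the inner dict generated from rotation offsets (0,1,3,2).
import Mathlib
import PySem

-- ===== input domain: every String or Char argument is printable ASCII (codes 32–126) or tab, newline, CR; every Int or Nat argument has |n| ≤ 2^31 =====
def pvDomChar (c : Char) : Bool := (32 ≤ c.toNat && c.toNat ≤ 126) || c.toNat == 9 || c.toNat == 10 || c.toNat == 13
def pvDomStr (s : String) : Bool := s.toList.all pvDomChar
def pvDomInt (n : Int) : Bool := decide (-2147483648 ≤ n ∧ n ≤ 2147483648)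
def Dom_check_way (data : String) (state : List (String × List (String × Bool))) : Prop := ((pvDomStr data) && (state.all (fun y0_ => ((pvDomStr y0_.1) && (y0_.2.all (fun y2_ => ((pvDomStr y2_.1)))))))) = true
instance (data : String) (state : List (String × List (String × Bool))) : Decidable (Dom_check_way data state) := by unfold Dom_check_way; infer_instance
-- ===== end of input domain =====

-- B replaces A's 16 hand-written transition cases by rotation composition in the
-- cyclic order front→left→back→right (objective: idiomatic/shorter).

-- ===== PORT A =====
-- the four literal dicts A assigns (as association lists, in A's insertion order)
def dictFront : List (String × List (String × Bool)) :=
  [("front", [("front", true), ("left", true), ("right", true), ("back", true)])]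
def dictLeft : List (String × List (String × Bool)) :=
  [("left", [("left", true), ("back", true), ("front", true), ("right", true)])]
def dictRight : List (String × List (String × Bool)) :=
  [("right", [("right", true), ("front", true), ("back", true), ("left", true)])]
def dictBack : List (String × List (String × Bool)) :=
  [("back", [("back", true), ("right", true), ("left", true), ("front", true)])]

-- one iteration of A's loop body (i : current key; s : current rebinding of `state`)
def checkWayStep (data : String) (s : List (String × List (String × Bool))) (i : String) :
    List (String × List (String × Bool)) :=
  if i == "front" then
    -- four sequential (non-elif) ifs, transliterated as successive rebindings
    let s1 := if data == "front" then dictFront else s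
    let s2 := if data == "left" then dictLeft else s1
    let s3 := if data == "right" then dictRight else s2
    if data == "back" then dictBack else s3
  else if i == "left" then
    if data == "front" then dictLeft
    else if data == "left" then dictBack
    else if data == "right" then dictFront
    else if data == "back" then dictRight
    else s
  else if i == "right" then
    if data == "front" then dictRight
    else if data == "left" then dictFront
    else if data == "right" then dictBack
    else if data == "back" then dictLeft
    else s
  else if i == "back" then
    if data == "front" then dictBack
    else if data == "left" then dictRight
    else if data == "right" then dictLeft
    else if data == "back" then dictFront
    else s
  else s

def check_way (data : String) (state : List (String × List (String × Bool))) :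
    List (String × List (String × Bool)) :=
  -- for i in state.keys(): ... (the iterator is over the ORIGINAL dict's keys)
  (state.map Prod.fst).foldl (checkWayStep data) state

-- ===== PORT B =====
def ORDER : List String := ["front", "left", "back", "right"]

-- one iteration of B's loop body
def checkWayAltStep (j : Nat) (s : List (String × List (String × Bool))) (i : String) :
    List (String × List (String × Bool)) :=
  if ORDER.contains i then
    let k := (((PySem.List.index? ORDER i).getD 0) + j) % 4
    [(ORDER.getD k "",
      ([0, 1, 3, 2] : List Nat).map (fun o => (ORDER.getD ((k + o) % 4) "", true)))]
  else s

def check_way_alt (data : String) (state : List (String × List (String × Bool))) :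
    List (String × List (String × Bool)) :=
  if ORDER.contains data then
    let j := (PySem.List.index? ORDER data).getD 0
    (state.map Prod.fst).foldl (checkWayAltStep j) state
  else state

-- ===== PRECONDITION & SPEC =====
def Spec_check_way (data : String) (state : List (String × List (String × Bool))) (out : List (String × List (String × Bool))) : Prop := out = check_way_alt data state
instance (data : String) (state : List (String × List (String × Bool))) (out : List (String × List (String × Bool))) : Decidable (Spec_check_way data state out) := by unfold Spec_check_way; infer_instance

-- ===== CLAIM (what is proved, stated in full; the proofs are below) =====
def Claim_equal_check_way : Prop := ∀ (data : String) (state : List (String × List (String × Bool))), Dom_check_way data state → Spec_check_way data state (check_way data state)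

-- ===== LEMMAS AND PROOFS =====

-- when data is one of the four directions, the two loop bodies agree on every key
theorem step_eq_of_mem (data : String) (hd : ORDER.contains data = true)
    (s : List (String × List (String × Bool))) (i : String) :
    checkWayStep data s i = checkWayAltStep ((PySem.List.index? ORDER data).getD 0) s i := by
  have hd' : data = "front" ∨ data = "left" ∨ data = "back" ∨ data = "right" := by
    simpa [ORDER, List.contains_eq_mem] using hd
  by_cases h1 : i = "front"
  · subst h1; rcases hd' with h | h | h | h <;> subst h <;> simp [checkWayStep, checkWayAltStep, ORDER] <;> decide
  by_cases h2 : i = "left"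
  · subst h2; rcases hd' with h | h | h | h <;> subst h <;> simp [checkWayStep, checkWayAltStep, ORDER] <;> decide
  by_cases h3 : i = "right"
  · subst h3; rcases hd' with h | h | h | h <;> subst h <;> simp [checkWayStep, checkWayAltStep, ORDER] <;> decide
  by_cases h4 : i = "back"
  · subst h4; rcases hd' with h | h | h | h <;> subst h <;> simp [checkWayStep, checkWayAltStep, ORDER] <;> decide
  · rcases hd' with h | h | h | h <;> subst h <;>
      simp [checkWayStep, checkWayAltStep, ORDER, h1, h2, h3, h4]

-- when data is not a direction, A's loop body leaves the state unchanged
theorem step_id_of_not_mem (data : String) (hd : ORDER.contains data = false)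
    (s : List (String × List (String × Bool))) (i : String) :
    checkWayStep data s i = s := by
  have hd' : data ≠ "front" ∧ data ≠ "left" ∧ data ≠ "back" ∧ data ≠ "right" := by
    simpa [ORDER, List.contains_eq_mem, not_or] using hd
  obtain ⟨h1, h2, h3, h4⟩ := hd'
  simp [checkWayStep, h1, h2, h3, h4]

-- ===== VERDICT (by name: the statement is the Claim_ definition above) =====
theorem foldl_step_id (data : String) (hd : ORDER.contains data = false)
    (l : List String) (s : List (String × List (String × Bool))) :
    l.foldl (checkWayStep data) s = s := by
  induction l generalizing s with
  | nil => rfl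
  | cons x xs ih => rw [List.foldl_cons, step_id_of_not_mem data hd, ih]

theorem check_way_spec : Claim_equal_check_way := by
  intro data state _
  show check_way data state = check_way_alt data state
  unfold check_way check_way_alt
  by_cases hd : ORDER.contains data = true
  · simp only [hd, if_pos]
    exact PySem.List.foldl_congr_mem _ _ _ _ (fun s i _ => step_eq_of_mem data hd s i)
  · have hd' : ORDER.contains data = false := by simpa using hd
    simp only [hd', Bool.false_eq_true, if_neg, not_false_iff]
    exact foldl_step_id data hd' _ state
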